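-- pv_equiv track=rewrite | github.com/VernonFred/HR-System | backend/app/professional_scoring.py | _calculate_grade_from_cutoffs
-- ===== SOURCE A (Python) =====
-- from typing import Dict, List, Tuple, Optional
--
-- def _calculate_grade(score: int) -> str:
--     """根据分数计算等级"""
--     if score >= 90:
--         return 'A'
--     elif score >= 75:
--         return 'B'
--     elif score >= 60:
--         return 'C'
--     else:
--         return 'D'
--
-- def _calculate_grade_from_cutoffs(score: int, cutoffs: Dict[str, int]) -> str:
--     """根据配置的分数线计算等级"""
--     if not cutoffs:
--         return _calculate_grade(score)
--
--     sorted_grades = sorted(cutoffs.items(), key=lambda x: x[1], reverse=True)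
--     for grade, cutoff in sorted_grades:
--         if score >= cutoff:
--             return grade
--
--     return sorted_grades[-1][0] if sorted_grades else 'D'
-- ===== SOURCE B (Python) =====
-- def _calculate_grade(score: int) -> str:
--     if score >= 90:
--         return 'A'
--     elif score >= 75:
--         return 'B'
--     elif score >= 60:
--         return 'C'
--     else:
--         return 'D'
--
--
-- def _calculate_grade_from_cutoffs(score, cutoffs):
--     if not cutoffs:
--         return _calculate_grade(score)
--
--     best = None      # qualified entry with the largest cutoff; first-inserted wins ties
--     fallback = None  # entry with the smallest cutoff; last-inserted wins ties
--     for grade, cutoff in cutoffs.items():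
--         if cutoff <= score and (best is None or best[1] < cutoff):
--             best = (grade, cutoff)
--         if fallback is None or cutoff <= fallback[1]:
--             fallback = (grade, cutoff)
--     return best[0] if best is not None else fallback[0]
-- ===== Notes on version B (the rewrite author's own statement) =====
-- stated objective: alternative
-- what changed: Replaced sort-then-scan (sort cutoffs descending, return first grade whose cutoff is met, else the last sorted entry) by a single unsorted pass that keeps the best qualified entry and the minimum-cutoff fallback, with tie-breaking chosen to match the stable sort exactly.
import Mathlib
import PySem

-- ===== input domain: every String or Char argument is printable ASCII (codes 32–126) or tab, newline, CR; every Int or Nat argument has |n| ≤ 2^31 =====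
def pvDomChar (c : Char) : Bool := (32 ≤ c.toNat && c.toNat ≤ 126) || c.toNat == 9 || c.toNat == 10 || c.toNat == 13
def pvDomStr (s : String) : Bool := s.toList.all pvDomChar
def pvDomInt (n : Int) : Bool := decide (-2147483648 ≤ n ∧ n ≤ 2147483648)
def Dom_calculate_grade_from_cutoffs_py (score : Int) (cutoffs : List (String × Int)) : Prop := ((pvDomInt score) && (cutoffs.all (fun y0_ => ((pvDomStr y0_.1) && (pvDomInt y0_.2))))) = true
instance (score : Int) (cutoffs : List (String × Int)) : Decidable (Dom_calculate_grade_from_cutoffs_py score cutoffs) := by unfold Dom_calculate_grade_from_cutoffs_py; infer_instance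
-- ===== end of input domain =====

-- ===== PORT A =====
-- B replaces A's sort-then-scan by one unsorted pass (best qualified entry + min-cutoff fallback); objective: alternative.
-- helper `_calculate_grade` (shared by both Pythons, called only on empty cutoffs)
def pv_calc_grade (score : Int) : String :=
  if score ≥ 90 then "A" else if score ≥ 75 then "B" else if score ≥ 60 then "C" else "D"

-- the `for grade, cutoff in sorted_grades: if score >= cutoff: return grade` loop
def pv_loopA (score : Int) : List (String × Int) → Option String
  | [] => none
  | gc :: rest => if score ≥ gc.2 then some gc.1 else pv_loopA score rest

def calculate_grade_from_cutoffs_py (score : Int) (cutoffs : List (String × Int)) : String :=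
  if cutoffs = [] then pv_calc_grade score
  else
    let sorted_grades := PySem.List.sorted cutoffs (fun x => x.2) true
    match pv_loopA score sorted_grades with
    | some g => g
    | none =>
      -- `sorted_grades[-1][0] if sorted_grades else 'D'`
      match PySem.List.pyGet? sorted_grades (-1) with
      | some p => p.1
      | none => "D"

-- ===== PORT B =====
-- one loop-body step of Source B: update (best, fallback) with the next (grade, cutoff) pair
def pv_step (score : Int) (st : Option (String × Int) × Option (String × Int)) (p : String × Int) :
    Option (String × Int) × Option (String × Int) :=
  (match st.1 with
   | none => if p.2 ≤ score then some p else none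
   | some b => if p.2 ≤ score ∧ b.2 < p.2 then some p else some b,
   match st.2 with
   | none => some p
   | some f => if p.2 ≤ f.2 then some p else some f)

def calculate_grade_from_cutoffs_py_alt (score : Int) (cutoffs : List (String × Int)) : String :=
  if cutoffs = [] then pv_calc_grade score
  else
    let st := cutoffs.foldl (pv_step score) (none, none)
    match st.1 with
    | some b => b.1
    | none =>
      match st.2 with
      | some f => f.1
      | none => "D"   -- unreachable: cutoffs ≠ [] makes the fallback `some`; total-match default

-- ===== PRECONDITION & SPEC =====
def Spec_calculate_grade_from_cutoffs_py (score : Int) (cutoffs : List (String × Int)) (out : String) : Prop := out = calculate_grade_from_cutoffs_py_alt score cutoffs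
instance (score : Int) (cutoffs : List (String × Int)) (out : String) : Decidable (Spec_calculate_grade_from_cutoffs_py score cutoffs out) := by unfold Spec_calculate_grade_from_cutoffs_py; infer_instance

-- ===== CLAIM (what is proved, stated in full; the proofs are below) =====
def Claim_equal_calculate_grade_from_cutoffs_py : Prop := ∀ (score : Int) (cutoffs : List (String × Int)), Dom_calculate_grade_from_cutoffs_py score cutoffs → Spec_calculate_grade_from_cutoffs_py score cutoffs (calculate_grade_from_cutoffs_py score cutoffs)

-- ===== LEMMAS AND PROOFS =====

-- xs[-1] on a nonempty list is its last element
lemma pv_pyGet_neg_one {α : Type} (s : List α) (h : s ≠ []) :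
    PySem.List.pyGet? s (-1) = s.getLast? := by
  have hl : 0 < s.length := List.length_pos_iff.mpr h
  simp only [PySem.List.pyGet?, PySem.List.pyIdx?]
  rw [if_neg (by omega), if_pos (by omega)]
  simp [List.getLast?_eq_getElem?]

-- A's scan returns the grade of the first qualifying pair
lemma pv_loopA_eq_find (score : Int) (s : List (String × Int)) :
    pv_loopA score s = (s.find? (fun p => decide (p.2 ≤ score))).map (fun p => p.1) := by
  induction s with
  | nil => rfl
  | cons y ys ih =>
    by_cases h : y.2 ≤ score
    · simp [pv_loopA, List.find?, h, ge_iff_le]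
    · simp [pv_loopA, List.find?, h, ge_iff_le, ih]

lemma pv_insertBy_ne_nil {α : Type} (pr : α → α → Bool) (x : α) (s : List α) :
    PySem.List.insertBy pr x s ≠ [] := by
  cases s with
  | nil => simp [PySem.List.insertBy]
  | cons y ys => simp only [PySem.List.insertBy]; split <;> simp

-- inserting into a descending list: how the first qualifying element changes
lemma pv_find_insertBy (score : Int) (x : String × Int) (s : List (String × Int))
    (hs : s.Pairwise (fun a b => b.2 ≤ a.2)) :
    (PySem.List.insertBy (fun a b => decide (b.2 < a.2)) x s).find? (fun p => decide (p.2 ≤ score)) =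
    if x.2 ≤ score then
      match s.find? (fun p => decide (p.2 ≤ score)) with
      | none => some x
      | some m => if m.2 < x.2 then some x else some m
    else s.find? (fun p => decide (p.2 ≤ score)) := by
  induction s with
  | nil =>
    simp only [PySem.List.insertBy, List.find?]
    by_cases h : x.2 ≤ score <;> simp [h]
  | cons y ys ih =>
    rcases List.pairwise_cons.mp hs with ⟨hy, hys⟩
    by_cases hxy : y.2 < x.2
    · have heq : PySem.List.insertBy (fun a b => decide (b.2 < a.2)) x (y :: ys) = x :: y :: ys := by
        simp [PySem.List.insertBy, hxy]
      rw [heq]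
      by_cases hxq : x.2 ≤ score
      · cases hfind : (y :: ys).find? (fun p => decide (p.2 ≤ score)) with
        | none => simp [List.find?, hxq]
        | some m =>
          have hm : m ∈ y :: ys := List.mem_of_find?_eq_some hfind
          have hmx : m.2 < x.2 := by
            rcases List.mem_cons.mp hm with h | h
            · rw [h]; exact hxy
            · exact lt_of_le_of_lt (hy m h) hxy
          simp [List.find?, hxq, hmx]
      · simp [List.find?, hxq]
    · have heq : PySem.List.insertBy (fun a b => decide (b.2 < a.2)) x (y :: ys)
          = y :: PySem.List.insertBy (fun a b => decide (b.2 < a.2)) x ys := by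
        simp [PySem.List.insertBy, hxy]
      rw [heq]
      by_cases hyq : y.2 ≤ score
      · have hnyx : ¬ y.2 < x.2 := hxy
        by_cases hxq : x.2 ≤ score <;> simp [List.find?, hyq, hxq, hnyx]
      · have hq : (decide (y.2 ≤ score)) = false := by simpa using hyq
        rw [List.find?_cons, List.find?_cons, hq]
        simpa using ih hys

-- inserting into a descending list: how the last element changes
lemma pv_last_insertBy (x : String × Int) (s : List (String × Int))
    (hs : s.Pairwise (fun a b => b.2 ≤ a.2)) :
    (PySem.List.insertBy (fun a b => decide (b.2 < a.2)) x s).getLast? =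
    match s.getLast? with
    | none => some x
    | some l => if x.2 ≤ l.2 then some x else some l := by
  induction s with
  | nil => rfl
  | cons y ys ih =>
    rcases List.pairwise_cons.mp hs with ⟨hy, hys⟩
    by_cases hxy : y.2 < x.2
    · have heq : PySem.List.insertBy (fun a b => decide (b.2 < a.2)) x (y :: ys) = x :: y :: ys := by
        simp [PySem.List.insertBy, hxy]
      rw [heq, List.getLast?_cons_cons]
      cases hl : (y :: ys).getLast? with
      | none => simp at hl
      | some l =>
        have hm : l ∈ y :: ys := List.mem_of_getLast? hl
        have hlx : l.2 < x.2 := by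
          rcases List.mem_cons.mp hm with h | h
          · rw [h]; exact hxy
          · exact lt_of_le_of_lt (hy l h) hxy
        simp [not_le.mpr hlx]
    · have heq : PySem.List.insertBy (fun a b => decide (b.2 < a.2)) x (y :: ys)
          = y :: PySem.List.insertBy (fun a b => decide (b.2 < a.2)) x ys := by
        simp [PySem.List.insertBy, hxy]
      rw [heq]
      cases ys with
      | nil =>
        simp [PySem.List.insertBy, not_lt.mp hxy]
      | cons z zs =>
        have h1 : (y :: PySem.List.insertBy (fun a b => decide (b.2 < a.2)) x (z :: zs)).getLast?
            = (PySem.List.insertBy (fun a b => decide (b.2 < a.2)) x (z :: zs)).getLast? := by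
          cases hI : PySem.List.insertBy (fun a b => decide (b.2 < a.2)) x (z :: zs) with
          | nil => exact absurd hI (pv_insertBy_ne_nil _ _ _)
          | cons h t => rw [List.getLast?_cons_cons]
        rw [h1, ih hys, List.getLast?_cons_cons]

-- the single pass of B computes (first qualifying element, last element) of A's sorted list
lemma pv_fold_eq (score : Int) (xs : List (String × Int)) :
    xs.foldl (pv_step score) (none, none) =
      ((PySem.List.sorted xs (fun p => p.2) true).find? (fun p => decide (p.2 ≤ score)),
       (PySem.List.sorted xs (fun p => p.2) true).getLast?) := by
  induction xs using List.reverseRecOn with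
  | nil => rfl
  | append_singleton ys x ih =>
    have hs : PySem.List.sorted (ys ++ [x]) (fun p => p.2) true
        = PySem.List.insertBy (fun a b => decide (b.2 < a.2)) x
            (PySem.List.sorted ys (fun p => p.2) true) := by
      rw [PySem.List.sorted_rev_eq_foldl_insertBy, PySem.List.sorted_rev_eq_foldl_insertBy,
          List.foldl_append]
      rfl
    have hp := PySem.List.sorted_pairwise_rev ys (fun p => p.2)
    rw [List.foldl_append, ih, hs,
        pv_find_insertBy score x _ hp, pv_last_insertBy x _ hp]
    simp only [pv_step, List.foldl]
    rw [Prod.mk.injEq]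
    refine ⟨?_, rfl⟩
    · cases (PySem.List.sorted ys (fun p => p.2) true).find? (fun p => decide (p.2 ≤ score)) with
      | none => by_cases h : x.2 ≤ score <;> simp [h]
      | some b =>
        by_cases h1 : x.2 ≤ score <;> by_cases h2 : b.2 < x.2 <;> simp [h1, h2]

-- ===== VERDICT (by name: the statement is the Claim_ definition above) =====
theorem calculate_grade_from_cutoffs_py_spec : Claim_equal_calculate_grade_from_cutoffs_py := by
  intro score cutoffs _
  unfold Spec_calculate_grade_from_cutoffs_py
  by_cases h : cutoffs = []
  · simp [calculate_grade_from_cutoffs_py, calculate_grade_from_cutoffs_py_alt, h]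
  · have hne : PySem.List.sorted cutoffs (fun p => p.2) true ≠ [] := by
      simpa [PySem.List.sorted_eq_nil_iff] using h
    simp only [calculate_grade_from_cutoffs_py, calculate_grade_from_cutoffs_py_alt, if_neg h]
    rw [pv_fold_eq, pv_loopA_eq_find, pv_pyGet_neg_one _ hne]
    cases hf : (PySem.List.sorted cutoffs (fun p => p.2) true).find? (fun p => decide (p.2 ≤ score)) with
    | some m => simp
    | none =>
      cases hl : (PySem.List.sorted cutoffs (fun p => p.2) true).getLast? with
      | none => exact absurd (List.getLast?_eq_none_iff.mp hl) hne
      | some l => simp
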